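-- pv_equiv track=rewrite | github.com/WilliamKarolDiCioccio/saturn | scripts/jni_on_load_generator.py | kotlin_to_jni_type
-- ===== SOURCE A (Python) =====
-- def kotlin_to_jni_type(ktype: str, nullable: bool = False) -> str:
--     """
--     Convert Kotlin type to JNI signature.
--
--     Args:
--         ktype: Kotlin type name (e.g., "Int", "String")
--         nullable: Whether the type is nullable
--
--     Returns:
--         JNI type signature or None if unknown
--     """
--     # Handle array types
--     if ktype.endswith("Array"):
--         element_type = ktype[:-5]  # Remove "Array" suffix
--         element_sig = kotlin_to_jni_type(element_type, False)
--         if element_sig: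
--             return "[" + element_sig
--         return None
--
--     # Basic type mappings
--     mapping = {
--         "Int": "I",
--         "Float": "F",
--         "Double": "D",
--         "Long": "J",
--         "Boolean": "Z",
--         "Byte": "B",
--         "Short": "S",
--         "Char": "C",
--         "String": "Ljava/lang/String;",
--         "Unit": "V"
--     }
--
--     base_sig = mapping.get(ktype)
--     if not base_sig:
--         return None
--
--     # For nullable primitive types, we need to use wrapper objects
--     if nullable and base_sig in "IFDJZBSC":
--         wrapper_mapping = {
--             "I": "Ljava/lang/Integer;",
--             "F": "Ljava/lang/Float;",
--             "D": "Ljava/lang/Double;",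
--             "J": "Ljava/lang/Long;",
--             "Z": "Ljava/lang/Boolean;",
--             "B": "Ljava/lang/Byte;",
--             "S": "Ljava/lang/Short;",
--             "C": "Ljava/lang/Character;"
--         }
--         return wrapper_mapping[base_sig]
--
--     return base_sig
-- ===== SOURCE B (Python) =====
-- def _base_info(name):
--     """Return (plain signature, wrapper signature or None) for a base Kotlin type."""
--     if name == "Int":
--         return "I", "Ljava/lang/Integer;"
--     elif name == "Float":
--         return "F", "Ljava/lang/Float;"
--     elif name == "Double":
--         return "D", "Ljava/lang/Double;"
--     elif name == "Long":
--         return "J", "Ljava/lang/Long;"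
--     elif name == "Boolean":
--         return "Z", "Ljava/lang/Boolean;"
--     elif name == "Byte":
--         return "B", "Ljava/lang/Byte;"
--     elif name == "Short":
--         return "S", "Ljava/lang/Short;"
--     elif name == "Char":
--         return "C", "Ljava/lang/Character;"
--     elif name == "String":
--         return "Ljava/lang/String;", None
--     elif name == "Unit":
--         return "V", None
--     return None
--
--
-- def kotlin_to_jni_type(ktype: str, nullable: bool = False) -> str:
--     """Iterative re-implementation: count array nesting, then one if-chain lookup."""
--     depth = 0
--     while ktype.endswith("Array"):
--         ktype = ktype[:-5]
--         depth += 1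
--     info = _base_info(ktype)
--     if info is None:
--         return None
--     sig, wrapper = info
--     if depth == 0 and nullable and wrapper is not None:
--         return wrapper
--     return "[" * depth + sig
-- ===== Notes on version B (the rewrite author's own statement) =====
-- stated objective: simpler
-- what changed: Replaces A's recursion over the 'Array' suffix and its two dict lookups (base mapping plus wrapper dict keyed by the signature, with truthiness and substring checks) by an iterative strip-and-count loop followed by a single if-chain that yields the plain and wrapper signatures together, applying the wrapper only at depth 0.
import Mathlib
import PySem

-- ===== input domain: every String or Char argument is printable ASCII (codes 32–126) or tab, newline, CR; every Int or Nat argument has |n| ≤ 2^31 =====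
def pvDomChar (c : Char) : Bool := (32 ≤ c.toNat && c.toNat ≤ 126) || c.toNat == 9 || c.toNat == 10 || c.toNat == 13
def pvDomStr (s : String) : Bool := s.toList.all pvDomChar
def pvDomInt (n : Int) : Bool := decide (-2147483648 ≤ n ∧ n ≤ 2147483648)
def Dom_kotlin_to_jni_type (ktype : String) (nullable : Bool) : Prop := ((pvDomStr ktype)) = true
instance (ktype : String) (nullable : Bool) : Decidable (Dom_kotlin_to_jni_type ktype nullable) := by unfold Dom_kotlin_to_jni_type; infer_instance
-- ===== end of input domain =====

-- B replaces A's recursion on the "Array" suffix and its two dicts by an iterative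
-- strip-and-count loop and one if-chain (objective: simpler decomposition, same cost).

-- ===== PORT A =====

-- the literal `mapping` dict of A
def jniMapping : PySem.Dict (List Char) (List Char) := PySem.Dict.ofList
  [ ("Int".toList, "I".toList), ("Float".toList, "F".toList), ("Double".toList, "D".toList),
    ("Long".toList, "J".toList), ("Boolean".toList, "Z".toList), ("Byte".toList, "B".toList),
    ("Short".toList, "S".toList), ("Char".toList, "C".toList),
    ("String".toList, "Ljava/lang/String;".toList), ("Unit".toList, "V".toList) ]

-- the literal `wrapper_mapping` dict of A
def jniWrapper : PySem.Dict (List Char) (List Char) := PySem.Dict.ofList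
  [ ("I".toList, "Ljava/lang/Integer;".toList), ("F".toList, "Ljava/lang/Float;".toList),
    ("D".toList, "Ljava/lang/Double;".toList), ("J".toList, "Ljava/lang/Long;".toList),
    ("Z".toList, "Ljava/lang/Boolean;".toList), ("B".toList, "Ljava/lang/Byte;".toList),
    ("S".toList, "Ljava/lang/Short;".toList), ("C".toList, "Ljava/lang/Character;".toList) ]

-- termination measure for A's recursion and B's loop: ktype[:-5] is strictly shorter
theorem stripA_len_lt (s : List Char) (h : PySem.Chars.endswith s "Array".toList = true) :
    (PySem.List.slice s none (some (-5))).length < s.length := by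
  have hs : "Array".toList <:+ s := (PySem.Chars.endswith_iff s "Array".toList).mp h
  have h5 : 5 ≤ s.length := by
    have h1 := hs.length_le
    have h2 : ("Array".toList).length = 5 := by decide
    omega
  rw [PySem.List.slice_to_neg_ofNat s 5 (by omega)]
  simp [List.length_take]; omega

-- recursive core of A, on code points
def kotlinToJniA (s : List Char) (nullable : Bool) : Option (List Char) :=
  if h : PySem.Chars.endswith s "Array".toList = true then
    -- element_type = ktype[:-5]; element_sig = kotlin_to_jni_type(element_type, False)
    match kotlinToJniA (PySem.List.slice s none (some (-5))) false with
    | some es => if es = [] then none else some ('[' :: es)   -- `if element_sig:` truthiness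
    | none => none
  else
    match PySem.Dict.get? jniMapping s with
    | none => none
    | some baseSig =>
      if baseSig = [] then none                                -- `if not base_sig:` truthiness
      else if nullable && PySem.Chars.isIn baseSig "IFDJZBSC".toList then
        PySem.Dict.get? jniWrapper baseSig                     -- wrapper_mapping[base_sig]
      else some baseSig
termination_by s.length
decreasing_by exact stripA_len_lt s h

def kotlin_to_jni_type (ktype : String) (nullable : Bool) : Option String :=
  (kotlinToJniA ktype.toList nullable).map String.ofList

-- ===== PORT B =====

-- B's `_base_info`: one if-chain yielding the plain and wrapper signatures together
def baseInfo (name : List Char) : Option (List Char × Option (List Char)) :=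
  if name = "Int".toList then some ("I".toList, some "Ljava/lang/Integer;".toList)
  else if name = "Float".toList then some ("F".toList, some "Ljava/lang/Float;".toList)
  else if name = "Double".toList then some ("D".toList, some "Ljava/lang/Double;".toList)
  else if name = "Long".toList then some ("J".toList, some "Ljava/lang/Long;".toList)
  else if name = "Boolean".toList then some ("Z".toList, some "Ljava/lang/Boolean;".toList)
  else if name = "Byte".toList then some ("B".toList, some "Ljava/lang/Byte;".toList)
  else if name = "Short".toList then some ("S".toList, some "Ljava/lang/Short;".toList)
  else if name = "Char".toList then some ("C".toList, some "Ljava/lang/Character;".toList)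
  else if name = "String".toList then some ("Ljava/lang/String;".toList, none)
  else if name = "Unit".toList then some ("V".toList, none)
  else none

-- B's while-loop: strip the "Array" suffix, counting the nesting depth
def stripArrays (s : List Char) (depth : Nat) : List Char × Nat :=
  if h : PySem.Chars.endswith s "Array".toList = true then
    stripArrays (PySem.List.slice s none (some (-5))) (depth + 1)
  else (s, depth)
termination_by s.length
decreasing_by exact stripA_len_lt s h

def kotlinToJniB (s : List Char) (nullable : Bool) : Option (List Char) :=
  let p := stripArrays s 0
  match baseInfo p.1 with
  | none => none
  | some (sig, wrapper) =>
    if p.2 == 0 && nullable && wrapper.isSome then wrapper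
    else some (List.replicate p.2 '[' ++ sig)                 -- '[' * depth + sig

def kotlin_to_jni_type_alt (ktype : String) (nullable : Bool) : Option String :=
  (kotlinToJniB ktype.toList nullable).map String.ofList

-- ===== PRECONDITION & SPEC =====
def Spec_kotlin_to_jni_type (ktype : String) (nullable : Bool) (out : Option String) : Prop := out = kotlin_to_jni_type_alt ktype nullable
instance (ktype : String) (nullable : Bool) (out : Option String) : Decidable (Spec_kotlin_to_jni_type ktype nullable out) := by unfold Spec_kotlin_to_jni_type; infer_instance

-- ===== CLAIM (what is proved, stated in full; the proofs are below) =====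
def Claim_equal_kotlin_to_jni_type : Prop := ∀ (ktype : String) (nullable : Bool), Dom_kotlin_to_jni_type ktype nullable → Spec_kotlin_to_jni_type ktype nullable (kotlin_to_jni_type ktype nullable)

-- ===== LEMMAS AND PROOFS =====

-- a string shorter than "Array" cannot end with it
theorem endswith_false_of_short (s : List Char) (hlt : s.length < 5) :
    PySem.Chars.endswith s "Array".toList = false := by
  cases hE : PySem.Chars.endswith s "Array".toList with
  | false => rfl
  | true =>
    have hs := ((PySem.Chars.endswith_iff s "Array".toList).mp hE).length_le
    have h2 : ("Array".toList).length = 5 := by decide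
    omega

-- the depth accumulator only shifts the result
theorem stripArrays_shift_aux (n : Nat) : ∀ (s : List Char), s.length ≤ n → ∀ (d : Nat),
    stripArrays s d = ((stripArrays s 0).1, (stripArrays s 0).2 + d) := by
  induction n with
  | zero =>
    intro s hs d
    have hE : PySem.Chars.endswith s ['A', 'r', 'r', 'a', 'y'] = false :=
      endswith_false_of_short s (by omega)
    unfold stripArrays
    simp [hE]
  | succ n ih =>
    intro s hs d
    by_cases hE : PySem.Chars.endswith s "Array".toList = true
    · have hlt := stripA_len_lt s hE
      have hlen : (PySem.List.slice s none (some (-5))).length ≤ n := by omega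
      conv_lhs => rw [stripArrays]
      conv_rhs => rw [stripArrays]
      simp only [hE, dite_true]
      rw [ih _ hlen (d + 1), ih _ hlen 1]
      simp; omega
    · have hE' : PySem.Chars.endswith s ['A', 'r', 'r', 'a', 'y'] = false := by
        simpa using hE
      unfold stripArrays
      simp [hE']

theorem stripArrays_shift (s : List Char) (d : Nat) :
    stripArrays s d = ((stripArrays s 0).1, (stripArrays s 0).2 + d) :=
  stripArrays_shift_aux s.length s le_rfl d

-- the chain's plain signature is never empty
theorem baseInfo_sig_ne_nil (s sig : List Char) (w : Option (List Char))
    (h : baseInfo s = some (sig, w)) : sig ≠ [] := by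
  intro hnil
  subst hnil
  unfold baseInfo at h
  split_ifs at h <;> simp_all

-- with nullable = False, B's core returns the plain array signature and never the empty string
theorem kotlinToJniB_false (s : List Char) :
    kotlinToJniB s false =
      match baseInfo (stripArrays s 0).1 with
      | none => none
      | some (sig, _) => some (List.replicate (stripArrays s 0).2 '[' ++ sig) := by
  unfold kotlinToJniB
  cases h : baseInfo (stripArrays s 0).1 with
  | none => simp [h]
  | some p => cases p with
    | mk sig w => simp [h]

-- base case: on a string not ending in "Array", A's dict lookups agree with B's if-chain
set_option maxHeartbeats 1000000 in
theorem base_case_eq (s : List Char) (nb : Bool)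
    (hE : PySem.Chars.endswith s "Array".toList = false) :
    kotlinToJniA s nb = kotlinToJniB s nb := by
  unfold kotlinToJniA kotlinToJniB stripArrays baseInfo
  simp only [hE, Bool.false_eq_true, dite_false]
  split_ifs with h1 h2 h3 h4 h5 h6 h7 h8 h9 h10
  · subst h1; cases nb <;> decide
  · subst h2; cases nb <;> decide
  · subst h3; cases nb <;> decide
  · subst h4; cases nb <;> decide
  · subst h5; cases nb <;> decide
  · subst h6; cases nb <;> decide
  · subst h7; cases nb <;> decide
  · subst h8; cases nb <;> decide
  · subst h9; cases nb <;> decide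
  · subst h10; cases nb <;> decide
  · have hg : PySem.Dict.get? jniMapping s = none := by
      have hm : jniMapping = PySem.Dict.mk
        [ ("Int".toList, "I".toList), ("Float".toList, "F".toList), ("Double".toList, "D".toList),
          ("Long".toList, "J".toList), ("Boolean".toList, "Z".toList), ("Byte".toList, "B".toList),
          ("Short".toList, "S".toList), ("Char".toList, "C".toList),
          ("String".toList, "Ljava/lang/String;".toList), ("Unit".toList, "V".toList) ] := by decide
      rw [hm]
      simp only [PySem.Dict.get?_mk_cons, beq_iff_eq]
      rw [if_neg (fun h => h1 h.symm), if_neg (fun h => h2 h.symm), if_neg (fun h => h3 h.symm),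
          if_neg (fun h => h4 h.symm), if_neg (fun h => h5 h.symm), if_neg (fun h => h6 h.symm),
          if_neg (fun h => h7 h.symm), if_neg (fun h => h8 h.symm), if_neg (fun h => h9 h.symm),
          if_neg (fun h => h10 h.symm)]
      rfl
    rw [hg]

theorem core_eq_aux (n : Nat) : ∀ (s : List Char), s.length ≤ n → ∀ (nb : Bool),
    kotlinToJniA s nb = kotlinToJniB s nb := by
  induction n with
  | zero =>
    intro s hs nb
    exact base_case_eq s nb (endswith_false_of_short s (by omega))
  | succ n ih =>
    intro s hs nb
    by_cases hE : PySem.Chars.endswith s "Array".toList = true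
    · have hlt := stripA_len_lt s hE
      have hlen : (PySem.List.slice s none (some (-5))).length ≤ n := by omega
      conv_lhs => rw [kotlinToJniA]
      simp only [hE, dite_true]
      rw [ih _ hlen false, kotlinToJniB_false]
      unfold kotlinToJniB
      conv_rhs => rw [stripArrays]
      simp only [hE, dite_true]
      rw [stripArrays_shift (PySem.List.slice s none (some (-5))) 1]
      cases hg : baseInfo (stripArrays (PySem.List.slice s none (some (-5))) 0).1 with
      | none => simp
      | some p =>
        cases p with
        | mk sig w =>
          have hb := baseInfo_sig_ne_nil _ sig w hg
          simp [hb, List.replicate_succ]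
    · exact base_case_eq s nb (by simpa using hE)

theorem core_eq (s : List Char) (nb : Bool) : kotlinToJniA s nb = kotlinToJniB s nb :=
  core_eq_aux s.length s le_rfl nb

-- ===== VERDICT (by name: the statement is the Claim_ definition above) =====
theorem kotlin_to_jni_type_spec : Claim_equal_kotlin_to_jni_type := by
  intro ktype nullable _
  unfold Spec_kotlin_to_jni_type kotlin_to_jni_type kotlin_to_jni_type_alt
  rw [core_eq]
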